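-- pv_equiv track=rewrite | github.com/saikoushik619/send_note | student_app/views.py | masked
-- ===== SOURCE A (Python) =====
-- def masked(phone):
--     s=''
--     for i in range(0,len(phone)):
--         if i%2==0:
--             s=s+'x'
--         else:
--             s=s+phone[i]
--     return s
-- ===== SOURCE B (Python) =====
-- def masked(phone):
--     lst = list(phone)
--     lst[::2] = 'x' * len(range(0, len(phone), 2))
--     return ''.join(lst)
-- ===== Notes on version B (the rewrite author's own statement) =====
-- stated objective: idiomatic
-- what changed: Replaces the per-index loop with a parity branch and repeated string concatenation (quadratic in CPython) by a bulk strided slice assignment over a char list and a single join (linear); no per-character loop or parity test remains.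
import Mathlib
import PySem

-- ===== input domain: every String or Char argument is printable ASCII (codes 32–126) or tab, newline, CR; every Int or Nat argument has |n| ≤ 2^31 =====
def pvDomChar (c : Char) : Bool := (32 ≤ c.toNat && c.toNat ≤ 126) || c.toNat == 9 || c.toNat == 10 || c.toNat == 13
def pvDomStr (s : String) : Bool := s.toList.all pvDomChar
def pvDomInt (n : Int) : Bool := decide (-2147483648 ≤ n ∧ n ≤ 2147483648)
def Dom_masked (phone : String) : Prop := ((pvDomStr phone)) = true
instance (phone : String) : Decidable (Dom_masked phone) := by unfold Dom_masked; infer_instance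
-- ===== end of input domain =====

-- B replaces A's per-index loop with a parity branch by a bulk stride-2 replacement over the
-- char list plus one join (idiomatic; return value only, no side effects in either version).

-- ===== PORT A =====
-- literal port of A: accumulate s over range(0, len(phone)), branching on i % 2 == 0
def masked (phone : String) : String :=
  let cs := phone.toList
  String.mk
    ((PySem.List.pyRange 0 (PySem.Str.len phone) 1).foldl
      (fun s i => if PySem.Int.mod i 2 = 0 then s ++ ['x'] else s ++ [PySem.List.pyGetD cs i 'x'])
      ([] : List Char))

-- ===== PORT B =====
-- port of Source B's strided slice assignment lst[::2] = 'x' * …: every element at an even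
-- stride position becomes 'x', the in-between elements are kept; then one join.
def maskEven : List Char → List Char
  | [] => []
  | [_] => ['x']
  | _ :: b :: t => 'x' :: b :: maskEven t

def masked_alt (phone : String) : String := String.mk (maskEven phone.toList)

-- ===== PRECONDITION & SPEC =====
def Spec_masked (phone : String) (out : String) : Prop := out = masked_alt phone
instance (phone : String) (out : String) : Decidable (Spec_masked phone out) := by unfold Spec_masked; infer_instance

-- ===== CLAIM (what is proved, stated in full; the proofs are below) =====
def Claim_equal_masked : Prop := ∀ (phone : String), Dom_masked phone → Spec_masked phone (masked phone)

-- ===== LEMMAS AND PROOFS =====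

theorem maskEven_length (cs : List Char) : (maskEven cs).length = cs.length := by
  induction cs using maskEven.induct <;> simp [maskEven, *]

theorem maskEven_getElem? (cs : List Char) (k : Nat) (hk : k < cs.length) :
    (maskEven cs)[k]? = some (if k % 2 = 0 then 'x' else cs.getD k 'x') := by
  induction cs using maskEven.induct generalizing k with
  | case1 => simp at hk
  | case2 a =>
    have hk0 : k = 0 := by simpa using hk
    subst hk0; simp [maskEven]
  | case3 a b t ih =>
    match k with
    | 0 => simp [maskEven]
    | 1 => simp [maskEven]
    | (k + 2) =>
      simp only [maskEven, List.getElem?_cons_succ]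
      rw [ih k (by simpa using hk)]
      have : (k + 2) % 2 = k % 2 := by omega
      simp [this]

theorem masked_spec' (phone : String) : masked phone = masked_alt phone := by
  unfold masked masked_alt
  refine congrArg String.mk ?_
  have hfun : ∀ (s : List Char) (i : Int),
      (if PySem.Int.mod i 2 = 0 then s ++ ['x'] else s ++ [PySem.List.pyGetD phone.toList i 'x'])
        = s ++ [if PySem.Int.mod i 2 = 0 then 'x' else PySem.List.pyGetD phone.toList i 'x'] := by
    intro s i; split_ifs <;> rfl
  simp only [hfun]
  rw [PySem.List.foldl_append_singleton_eq_map, List.nil_append]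
  have hlen : PySem.Str.len phone = (phone.toList.length : Int) := by
    simp [PySem.Str.len_eq]
  apply List.ext_getElem?
  intro k
  by_cases hk : k < phone.toList.length
  · rw [hlen, PySem.List.getElem?_map_pyRange_zero _ _ _ hk, maskEven_getElem? _ _ hk]
    have hiff : PySem.Int.mod (k : Int) 2 = 0 ↔ k % 2 = 0 := by
      simp [PySem.Int.mod, Int.fmod_eq_emod_of_nonneg]
      omega
    congr 1
    by_cases h0 : k % 2 = 0
    · rw [if_pos (hiff.mpr h0), if_pos h0]
    · rw [if_neg (fun h => h0 (hiff.mp h)), if_neg h0]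
      simp [PySem.List.pyGetD_natCast, List.getD]
  · rw [List.getElem?_eq_none, List.getElem?_eq_none]
    · rw [maskEven_length]; omega
    · rw [List.length_map, PySem.List.length_pyRange_one, hlen]; omega

-- ===== VERDICT (by name: the statement is the Claim_ definition above) =====
theorem masked_spec : Claim_equal_masked := by
  intro phone _
  exact masked_spec' phone
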